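-- pv_equiv track=rewrite | github.com/GrzegorzManiak/TUD | Semester 2/Softdev/lab11.py | even_count
-- ===== SOURCE A (Python) =====
-- def even_count(list):
--     # Instantiate the counter
--     even = 0
--
--     # Loop trough the list
--     for i in range(len(list)):
--
--         # If the value is 0, do nothing
--         if list[i] == 0:
--             break
--
--         # If the number is even, incrament even
--         elif list[i] % 2 == 0:
--             even += 1
--
--     # Retrun the counter
--     return even
-- ===== SOURCE B (Python) =====
-- def even_count(list):
--     # locate the first zero (or take the whole list), slice the prefix,
--     # and count evens arithmetically: length minus the sum of parities.
--     k = list.index(0) if 0 in list else len(list)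
--     prefix = list[:k]
--     return len(prefix) - sum(x % 2 for x in prefix)
-- ===== Notes on version B (the rewrite author's own statement) =====
-- stated objective: alternative
-- what changed: Replaces the break-on-zero counting loop by three stages with no conditional counter: find the first zero's index with list.index, slice the prefix before it, and obtain the even count arithmetically as len(prefix) minus the sum of the parities x % 2.
import Mathlib
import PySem

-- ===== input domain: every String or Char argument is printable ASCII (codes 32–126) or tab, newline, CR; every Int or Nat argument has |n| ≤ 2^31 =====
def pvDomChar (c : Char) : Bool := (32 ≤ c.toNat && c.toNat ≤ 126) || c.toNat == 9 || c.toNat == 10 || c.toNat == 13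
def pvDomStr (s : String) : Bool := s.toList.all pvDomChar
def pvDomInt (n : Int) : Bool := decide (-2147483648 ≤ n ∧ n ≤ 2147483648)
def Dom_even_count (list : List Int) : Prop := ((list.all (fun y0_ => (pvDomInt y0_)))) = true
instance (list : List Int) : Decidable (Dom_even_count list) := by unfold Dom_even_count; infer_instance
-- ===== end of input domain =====

-- B replaces the break-on-zero counting loop by: find first zero's index, slice the prefix, count evens as length minus sum of parities; alternative decomposition, same cost.


-- ===== PORT A =====
-- loop with break, counter 'even'; structural recursion over the list in order
def evenCountLoop : List Int → Int → Int
  | [], even => even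
  | x :: xs, even =>
    if x = 0 then even
    else if PySem.Int.mod x 2 = 0 then evenCountLoop xs (even + 1)
    else evenCountLoop xs even

def even_count (list : List Int) : Int := evenCountLoop list 0

-- ===== PORT B =====
-- k = list.index(0) if 0 in list else len(list); prefix = list[:k]; len(prefix) - sum(x % 2 for x in prefix)
def even_count_alt (list : List Int) : Int :=
  let k : Int :=
    if 0 ∈ list then
      match PySem.List.index? list 0 with
      | some i => (i : Int)
      | none => (list.length : Int)
    else (list.length : Int)
  let pre := PySem.List.slice list none (some k)
  (pre.length : Int) - (pre.map (fun x => PySem.Int.mod x 2)).sum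

-- ===== PRECONDITION & SPEC =====
def Spec_even_count (list : List Int) (out : Int) : Prop := out = even_count_alt list
instance (list : List Int) (out : Int) : Decidable (Spec_even_count list out) := by unfold Spec_even_count; infer_instance

-- ===== CLAIM =====
def Claim_equal_even_count : Prop := ∀ (list : List Int), Dom_even_count list → Spec_even_count list (even_count list)

-- ===== LEMMAS AND PROOFS =====

-- B's prefix (slice up to the first zero's index, or the whole list) is the takeWhile-before-zero prefix
theorem prefix_eq (xs : List Int) :
    PySem.List.slice xs none (some
      (if 0 ∈ xs then
        (match PySem.List.index? xs 0 with
         | some i => (i : Int)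
         | none => (xs.length : Int))
       else (xs.length : Int)))
    = xs.takeWhile (fun x => x != 0) := by
  induction xs with
  | nil => rfl
  | cons x xs ih =>
    by_cases hx : x = 0
    · subst hx
      rw [PySem.List.index?_cons_self]
      simp only [List.mem_cons, true_or, if_pos]
      rw [PySem.List.slice_to _ (by omega)]
      simp
    · have hidx := PySem.List.index?_cons_of_ne (v := (0:Int)) (xs := xs) hx
      by_cases hm : (0:Int) ∈ xs
      · have hs := (PySem.List.index?_isSome_iff (xs := xs) (v := (0:Int))).2 hm
        obtain ⟨i, hi⟩ := Option.isSome_iff_exists.1 hs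
        rw [hi] at hidx
        have hmem : (0:Int) ∈ x :: xs := List.mem_cons_of_mem _ hm
        rw [if_pos hmem, hidx]
        simp only [Option.map_some]
        rw [PySem.List.slice_to_natCast]
        rw [if_pos hm, hi] at ih
        rw [PySem.List.slice_to_natCast] at ih
        simp [hx, List.take_succ_cons, ih]
      · have hmem : (0:Int) ∉ x :: xs := by
          intro h
          rcases List.mem_cons.1 h with h | h
          · exact hx h.symm
          · exact hm h
        rw [if_neg hmem, PySem.List.slice_to_natCast]
        rw [if_neg hm, PySem.List.slice_to_natCast] at ih
        simp only [List.take_length] at ih ⊢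
        rw [eq_comm, List.takeWhile_eq_self_iff]
        intro a ha
        simp only [bne_iff_ne, ne_eq]
        rcases List.mem_cons.1 ha with h | h
        · exact fun h0 => hx (h ▸ h0)
        · exact fun h0 => hm (h0 ▸ h)

-- parity arithmetic: length minus sum of (x mod 2) counts the evens
theorem parity_count (xs : List Int) :
    (xs.length : Int) - (xs.map (fun x => PySem.Int.mod x 2)).sum
      = ((xs.filter (fun x => PySem.Int.mod x 2 = 0)).length : Int) := by
  induction xs with
  | nil => simp
  | cons x xs ih =>
    have h0 : 0 ≤ PySem.Int.mod x 2 := PySem.Int.mod_nonneg x (by omega)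
    have h2 : PySem.Int.mod x 2 < 2 := PySem.Int.mod_lt x (by omega)
    rw [List.map_cons, List.sum_cons, List.filter_cons]
    by_cases he : PySem.Int.mod x 2 = 0
    · rw [if_pos (by simp only [decide_eq_true_eq]; exact he)]
      simp only [List.length_cons]
      push_cast
      omega
    · rw [if_neg (by simp only [decide_eq_true_eq]; exact he)]
      simp only [List.length_cons]
      push_cast
      omega

-- A's loop counts the evens of the takeWhile-before-zero prefix
theorem evenCountLoop_eq (xs : List Int) (acc : Int) :
    evenCountLoop xs acc =
      acc + (((xs.takeWhile (fun x => x != 0)).filter (fun x => PySem.Int.mod x 2 = 0)).length : Int) := by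
  induction xs generalizing acc with
  | nil => simp [evenCountLoop]
  | cons x xs ih =>
    by_cases hx : x = 0
    · simp [evenCountLoop, hx]
    · have hne : (x != 0) = true := by simp [hx]
      by_cases he : PySem.Int.mod x 2 = 0
      · rw [evenCountLoop, if_neg hx, if_pos he, ih, List.takeWhile_cons, if_pos hne,
          List.filter_cons, if_pos (by simp only [decide_eq_true_eq]; exact he)]
        simp only [List.length_cons]
        push_cast
        ring
      · rw [evenCountLoop, if_neg hx, if_neg he, ih, List.takeWhile_cons, if_pos hne,
          List.filter_cons, if_neg (by simp only [decide_eq_true_eq]; exact he)]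

-- ===== VERDICT =====
theorem even_count_spec : Claim_equal_even_count := by
  intro list _
  unfold Spec_even_count even_count even_count_alt
  simp only []
  rw [prefix_eq, parity_count, evenCountLoop_eq]
  omega
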